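-- pv_equiv track=rewrite | github.com/livingstaccato/provide-foundation | mutants/src/provide/foundation/crypto/utils.py | x_format_hash__mutmut_2
-- ===== SOURCE A (Python) =====
-- def x_format_hash__mutmut_2(
--     hash_value: str,
--     group_size: int = 8,
--     groups: int = 1,
--     separator: str = " ",
-- ) -> str:
--     """Format a hash value for display.
--
--     Args:
--         hash_value: Hash value to format
--         group_size: Number of characters per group
--         groups: Number of groups to show (0 for all)
--         separator: Separator between groups
--
--     Returns:
--         Formatted hash string
--
--     Examples:
--         >>> format_hash("abc123def456", group_size=4, separator="-")
--         "abc1-23de-f456"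
--         >>> format_hash("abc123def456", group_size=4, groups=2)
--         "abc1 23de"
--
--     """
--     if group_size <= 0:
--         return hash_value
--
--     formatted_parts = []
--     for i in range(0, len(hash_value), group_size):
--         formatted_parts.append(hash_value[i : i + group_size])
--         if groups > 0 and len(formatted_parts) >= groups:
--             break
--
--     return separator.join(formatted_parts)
-- ===== SOURCE B (Python) =====
-- def x_format_hash__mutmut_2(
--     hash_value: str,
--     group_size: int = 8,
--     groups: int = 1,
--     separator: str = " ",
-- ) -> str:
--     if group_size <= 0:
--         return hash_value
--     s = hash_value[: groups * group_size] if groups > 0 else hash_value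
--     out = []
--     count = 0
--     for ch in s:
--         if count == group_size:
--             out.append(separator)
--             count = 0
--         out.append(ch)
--         count += 1
--     return "".join(out)
-- ===== Notes on version B (the rewrite author's own statement) =====
-- stated objective: alternative
-- what changed: A builds a list of chunk substrings by stride slicing with an early break and joins them with the separator; B streams the (pre-truncated) string character by character with a per-group counter, emitting the separator inline whenever the counter rolls over, so no chunk list and no join-with-separator exist.
import Mathlib
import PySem

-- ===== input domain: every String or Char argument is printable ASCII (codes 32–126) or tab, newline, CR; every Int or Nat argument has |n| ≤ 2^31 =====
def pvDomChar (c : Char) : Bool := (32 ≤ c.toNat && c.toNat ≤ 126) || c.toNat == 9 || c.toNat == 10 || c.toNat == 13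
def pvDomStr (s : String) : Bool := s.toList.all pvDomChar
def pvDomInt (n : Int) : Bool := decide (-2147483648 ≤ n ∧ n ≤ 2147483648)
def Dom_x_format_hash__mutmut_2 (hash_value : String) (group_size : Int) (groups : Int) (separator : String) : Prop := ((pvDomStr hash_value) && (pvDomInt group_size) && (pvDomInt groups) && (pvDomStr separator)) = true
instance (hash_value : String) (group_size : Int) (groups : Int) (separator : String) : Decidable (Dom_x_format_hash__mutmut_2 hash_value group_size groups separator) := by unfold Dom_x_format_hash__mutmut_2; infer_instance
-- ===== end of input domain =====

-- B replaces A's build-chunk-list-with-break-then-join algorithm by a single character-streaming pass over the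
-- pre-truncated string with a per-group counter that emits the separator inline (alternative decomposition).

-- ===== PORT A =====
-- the 'for i in range(0, len(hash_value), group_size)' loop with the conditional break, acc = formatted_parts
def pvA_loop (hash_value : String) (group_size : Int) (groups : Int) :
    List Int → List String → List String
  | [], acc => acc
  | i :: rest, acc =>
    let acc' := acc ++ [PySem.Str.slice hash_value (some i) (some (i + group_size))]
    if groups > 0 ∧ (acc'.length : Int) ≥ groups then acc'
    else pvA_loop hash_value group_size groups rest acc'

def x_format_hash__mutmut_2 (hash_value : String) (group_size : Int) (groups : Int) (separator : String) : String :=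
  if group_size ≤ 0 then hash_value
  else
    PySem.Str.join separator
      (pvA_loop hash_value group_size groups
        (PySem.List.pyRange 0 (PySem.Str.len hash_value) group_size) [])

-- ===== PORT B =====
-- the 'for ch in s' loop: state = (out as accumulated characters, count); "".join(out) = String.ofList
def x_format_hash__mutmut_2_alt (hash_value : String) (group_size : Int) (groups : Int) (separator : String) : String :=
  if group_size ≤ 0 then hash_value
  else
    let s := if groups > 0 then PySem.Str.slice hash_value none (some (groups * group_size)) else hash_value
    String.ofList
      (s.toList.foldl
        (fun (st : List Char × Int) ch =>
          let st' := if st.2 = group_size then (st.1 ++ separator.toList, (0 : Int)) else st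
          (st'.1 ++ [ch], st'.2 + 1))
        ([], 0)).1

-- ===== PRECONDITION & SPEC =====
def Spec_x_format_hash__mutmut_2 (hash_value : String) (group_size : Int) (groups : Int) (separator : String) (out : String) : Prop := out = x_format_hash__mutmut_2_alt hash_value group_size groups separator
instance (hash_value : String) (group_size : Int) (groups : Int) (separator : String) (out : String) : Decidable (Spec_x_format_hash__mutmut_2 hash_value group_size groups separator out) := by unfold Spec_x_format_hash__mutmut_2; infer_instance

-- ===== CLAIM (what is proved, stated in full; the proofs are below) =====
def Claim_equal_x_format_hash__mutmut_2 : Prop := ∀ (hash_value : String) (group_size : Int) (groups : Int) (separator : String), Dom_x_format_hash__mutmut_2 hash_value group_size groups separator → Spec_x_format_hash__mutmut_2 hash_value group_size groups separator (x_format_hash__mutmut_2 hash_value group_size groups separator)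

-- ===== LEMMAS AND PROOFS =====

theorem pvStr_ext {s t : String} (h : s.toList = t.toList) : s = t := by
  have h2 := congrArg String.ofList h
  simpa [String.ofList_toList] using h2

-- proof-side intermediate form: separator-join of the stride-slice chunks of the truncated string
def pvChunksStr (s : String) (group_size : Int) : List String :=
  (PySem.List.pyRange 0 (PySem.Str.len s) group_size).map
    (fun i => PySem.Str.slice s (some i) (some (i + group_size)))

def pvJoinChunks (hash_value : String) (group_size : Int) (groups : Int) (separator : String) : String :=
  if group_size ≤ 0 then hash_value
  else
    let s := if groups > 0 then PySem.Str.slice hash_value none (some (groups * group_size)) else hash_value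
    PySem.Str.join separator (pvChunksStr s group_size)

-- A's loop when groups ≤ 0: the break never fires, every index is processed
theorem pvA_loop_all (hash_value : String) (group_size : Int) (groups : Int)
    (hgr : ¬ groups > 0) (idxs : List Int) (acc : List String) :
    pvA_loop hash_value group_size groups idxs acc
      = acc ++ idxs.map (fun i => PySem.Str.slice hash_value (some i) (some (i + group_size))) := by
  induction idxs generalizing acc with
  | nil => simp [pvA_loop]
  | cons i rest ih =>
    simp only [pvA_loop]
    rw [if_neg (fun h => hgr h.1), ih]
    simp

-- A's loop when groups > 0: it processes exactly groups - len(acc) more indices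
theorem pvA_loop_take (hash_value : String) (group_size : Int) (groups : Int)
    (hgr : groups > 0) (idxs : List Int) (acc : List String)
    (hacc : (acc.length : Int) < groups) :
    pvA_loop hash_value group_size groups idxs acc
      = acc ++ (idxs.take (groups.toNat - acc.length)).map
          (fun i => PySem.Str.slice hash_value (some i) (some (i + group_size))) := by
  induction idxs generalizing acc with
  | nil => simp [pvA_loop]
  | cons i rest ih =>
    simp only [pvA_loop]
    by_cases hbrk : ((acc ++ [PySem.Str.slice hash_value (some i) (some (i + group_size))]).length : Int) ≥ groups
    · rw [if_pos ⟨hgr, hbrk⟩]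
      have h1 : groups.toNat - acc.length = 1 := by
        simp at hbrk; omega
      simp [h1]
    · rw [if_neg (by intro h; exact hbrk h.2)]
      have hlt : (((acc ++ [PySem.Str.slice hash_value (some i) (some (i + group_size))]).length : Int)) < groups := by
        omega
      rw [ih _ hlt]
      have htk : groups.toNat - acc.length = (groups.toNat - (acc.length + 1)) + 1 := by
        simp at hbrk; omega
      simp [htk, List.take_succ_cons]

-- a chunk taken inside the truncated prefix equals the chunk of the original list
theorem pvChunk_take (cs : List Char) (g' G' k : ℕ) (hk : k < G') :
    ((cs.take (G' * g')).drop (g' * k)).take g' = (cs.drop (g' * k)).take g' := by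
  rw [List.drop_take, List.take_take]
  have : g' ≤ G' * g' - g' * k := by
    have h1 : g' * (k + 1) ≤ g' * G' := Nat.mul_le_mul_left g' hk
    have h2 : g' * k + g' = g' * (k + 1) := by ring
    have h3 : g' * G' = G' * g' := Nat.mul_comm _ _
    omega
  rw [Nat.min_eq_left this]

-- the pyRange chunk count, over ℕ: ceiling division
theorem pvCount_eq (len g' : ℕ) (hg : 0 < g') :
    (if (0:ℤ) < (len:ℤ) then ((((len:ℤ)) - 0 + (g':ℤ) - 1) / (g':ℤ)).toNat else 0)
      = (len + g' - 1) / g' := by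
  by_cases h0 : len = 0
  · subst h0
    simp [Nat.div_eq_of_lt (by omega : g' - 1 < g')]
  · rw [if_pos (by exact_mod_cast Nat.pos_of_ne_zero h0)]
    have hcast : ((len:ℤ)) - 0 + (g':ℤ) - 1 = ((len + g' - 1 : ℕ) : ℤ) := by
      push_cast [Nat.cast_sub (by omega : 1 ≤ len + g')]; ring
    rw [hcast]
    exact_mod_cast rfl

-- ceiling division of the clamped length = min of group count and full count
theorem pvMin_ceil (len g' G' : ℕ) (hg : 0 < g') :
    (min (G' * g') len + g' - 1) / g' = min G' ((len + g' - 1) / g') := by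
  rcases le_total (G' * g') len with h | h
  · rw [Nat.min_eq_left h]
    have hL : (G' * g' + g' - 1) / g' = G' := by
      have : G' * g' + g' - 1 = g' * G' + (g' - 1) := by
        rw [Nat.mul_comm]; omega
      rw [this, Nat.mul_add_div hg, Nat.div_eq_of_lt (by omega : g' - 1 < g')]
      omega
    rw [hL, Nat.min_eq_left]
    rw [Nat.le_div_iff_mul_le hg]
    omega
  · rw [Nat.min_eq_right h, Nat.min_eq_right]
    have : (len + g' - 1) / g' < G' + 1 := by
      rw [Nat.div_lt_iff_lt_mul hg]
      have : (G' + 1) * g' = G' * g' + g' := by ring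
      omega
    omega

-- A equals the separator-join of the stride-slice chunks of the up-front-truncated string
theorem pvA_eq_joinChunks (hash_value : String) (group_size : Int) (groups : Int) (separator : String) :
    x_format_hash__mutmut_2 hash_value group_size groups separator
      = pvJoinChunks hash_value group_size groups separator := by
  unfold x_format_hash__mutmut_2 pvJoinChunks
  by_cases hgs : group_size ≤ 0
  · simp [hgs]
  · rw [if_neg hgs, if_neg hgs]
    by_cases hgr : groups > 0
    · rw [if_pos hgr]
      obtain ⟨g', hg'⟩ : ∃ g' : ℕ, group_size = (g' : ℤ) :=
        ⟨group_size.toNat, (Int.toNat_of_nonneg (by omega)).symm⟩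
      obtain ⟨G', hG'⟩ : ∃ G' : ℕ, groups = (G' : ℤ) :=
        ⟨groups.toNat, (Int.toNat_of_nonneg (by omega)).symm⟩
      subst hg'
      subst hG'
      have hg'pos : 0 < g' := by omega
      have hG'pos : 0 < G' := by omega
      have hsl : (PySem.Str.slice hash_value none (some ((G':ℤ) * (g':ℤ)))).toList
          = hash_value.toList.take (G' * g') := by
        rw [PySem.Str.toList_slice, PySem.Chars.slice_eq_listSlice,
          ← Nat.cast_mul, PySem.List.slice_to_natCast]
      rw [pvA_loop_take hash_value _ _ hgr _ [] (by simpa using hgr)]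
      unfold pvChunksStr
      congr 1
      rw [PySem.Str.len_eq, PySem.Str.len_eq, hsl, List.length_take,
        PySem.List.pyRange_of_pos 0 _ (by exact_mod_cast hg'pos : (0:ℤ) < (g':ℤ)),
        PySem.List.pyRange_of_pos 0 _ (by exact_mod_cast hg'pos : (0:ℤ) < (g':ℤ))]
      have hcA := pvCount_eq hash_value.toList.length g' hg'pos
      have hcB := pvCount_eq (min (G' * g') hash_value.toList.length) g' hg'pos
      simp only [List.nil_append, List.length_nil, Nat.sub_zero, Int.toNat_natCast,
        ← List.map_take, List.take_range, List.map_map]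
      rw [hcA, hcB, pvMin_ceil hash_value.toList.length g' G' hg'pos]
      apply List.map_congr_left
      intro k hk
      rw [List.mem_range] at hk
      have hkG : k < G' := lt_of_lt_of_le hk (Nat.min_le_left _ _)
      apply pvStr_ext
      simp only [Function.comp]
      rw [PySem.Str.toList_slice, PySem.Str.toList_slice,
        PySem.Chars.slice_eq_listSlice, PySem.Chars.slice_eq_listSlice]
      have ha : (0:ℤ) ≤ 0 + (g':ℤ) * (k:ℤ) := by positivity
      have hb : (0:ℤ) ≤ 0 + (g':ℤ) * (k:ℤ) + (g':ℤ) := by positivity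
      rw [PySem.List.slice_toNat _ ha hb, PySem.List.slice_toNat _ ha hb, hsl]
      have hat : ((0:ℤ) + (g':ℤ) * (k:ℤ)).toNat = g' * k := by omega
      have hbt : ((0:ℤ) + (g':ℤ) * (k:ℤ) + (g':ℤ)).toNat = g' * k + g' := by omega
      rw [hat, hbt]
      have hsub : g' * k + g' - g' * k = g' := by omega
      rw [hsub, pvChunk_take hash_value.toList g' G' k hkG]
    · rw [if_neg hgr, pvA_loop_all hash_value group_size groups hgr _ []]
      unfold pvChunksStr
      simp

-- ================= B side: the streaming pass =================

-- front-recursion form of B's fold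
def pvRec (sepl : List Char) (g : Int) : List Char → Int → List Char
  | [], _ => []
  | c :: t, cnt =>
    if cnt = g then sepl ++ c :: pvRec sepl g t 1 else c :: pvRec sepl g t (cnt + 1)

theorem pvFold_eq_rec (sepl : List Char) (g : Int) (cs : List Char) (acc : List Char) (cnt : Int) :
    (cs.foldl
      (fun (st : List Char × Int) ch =>
        let st' := if st.2 = g then (st.1 ++ sepl, (0 : Int)) else st
        (st'.1 ++ [ch], st'.2 + 1))
      (acc, cnt)).1 = acc ++ pvRec sepl g cs cnt := by
  induction cs generalizing acc cnt with
  | nil => simp [pvRec]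
  | cons c t ih =>
    by_cases h : cnt = g
    · simp only [List.foldl_cons, pvRec, h]
      rw [ih]
      simp
    · simp only [List.foldl_cons, pvRec, if_neg h]
      rw [ih]
      simp

-- running pvRec from count cn < g' consumes the next g' - cn characters, then restarts at count g'
theorem pvRec_run (sepl : List Char) (g' : ℕ) (hg : 0 < g') :
    ∀ (cs : List Char) (cn : ℕ), cn < g' →
      pvRec sepl (g' : ℤ) cs (cn : ℤ)
        = cs.take (g' - cn)
          ++ (if cs.drop (g' - cn) = [] then []
              else pvRec sepl (g' : ℤ) (cs.drop (g' - cn)) (g' : ℤ)) := by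
  intro cs
  induction cs with
  | nil => intro cn _; simp [pvRec]
  | cons c t ih =>
    intro cn hcn
    have hne : ((cn : ℤ)) ≠ (g' : ℤ) := by exact_mod_cast Nat.ne_of_lt hcn
    rw [pvRec, if_neg hne]
    by_cases h1 : cn + 1 < g'
    · have hcast : (cn : ℤ) + 1 = ((cn + 1 : ℕ) : ℤ) := by push_cast; ring
      rw [hcast, ih (cn + 1) h1]
      have htk : g' - cn = (g' - (cn + 1)) + 1 := by omega
      rw [htk]
      simp [List.take_succ_cons]
    · have heq : cn + 1 = g' := by omega
      have hcast : (cn : ℤ) + 1 = (g' : ℤ) := by exact_mod_cast congrArg (Nat.cast : ℕ → ℤ) heq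
      have htk : g' - cn = 1 := by omega
      rw [hcast, htk]
      cases t with
      | nil => simp [pvRec]
      | cons d ds => simp

-- at count g' on a nonempty list, pvRec emits the separator and restarts at count 0
theorem pvRec_top (sepl : List Char) (g' : ℕ) (hg : 0 < g') (c : Char) (t : List Char) :
    pvRec sepl (g' : ℤ) (c :: t) (g' : ℤ) = sepl ++ pvRec sepl (g' : ℤ) (c :: t) 0 := by
  have h0 : (0 : ℤ) ≠ (g' : ℤ) := by exact_mod_cast Nat.ne_of_lt hg
  rw [pvRec, if_pos rfl, pvRec, if_neg h0, zero_add]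

-- the chunk list of a character list, as a range-map (matches the A-side chunk form)
def pvChunksL (g' : ℕ) (cs : List Char) : List (List Char) :=
  (List.range ((cs.length + g' - 1) / g')).map (fun k => (cs.drop (g' * k)).take g')

theorem pvChunksL_nil (g' : ℕ) (hg : 0 < g') : pvChunksL g' [] = [] := by
  simp [pvChunksL]
  omega

theorem pvCnt_cons (g' n : ℕ) (hg : 0 < g') (hn : 0 < n) :
    (n + g' - 1) / g' = ((n - g') + g' - 1) / g' + 1 := by
  by_cases h : n ≤ g'
  · have h1 : n + g' - 1 = (n - 1) + g' := by omega
    have h2 : n - g' = 0 := by omega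
    rw [h1, Nat.add_div_right _ hg, h2,
      Nat.div_eq_of_lt (by omega : n - 1 < g'),
      Nat.div_eq_of_lt (by omega : 0 + g' - 1 < g')]
  · have h1 : n + g' - 1 = ((n - g') + g' - 1) + g' := by omega
    rw [h1, Nat.add_div_right _ hg]

theorem pvChunksL_cons (g' : ℕ) (hg : 0 < g') (cs : List Char) (h : cs ≠ []) :
    pvChunksL g' cs = cs.take g' :: pvChunksL g' (cs.drop g') := by
  unfold pvChunksL
  rw [List.length_drop, pvCnt_cons g' cs.length hg (List.length_pos_of_ne_nil h),
    List.range_succ_eq_map, List.map_cons, List.map_map]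
  congr 1
  apply List.map_congr_left
  intro k _
  simp only [Function.comp, Nat.succ_eq_add_one]
  rw [List.drop_drop]
  congr 2
  ring

theorem pvChunksL_ne_nil (g' : ℕ) (hg : 0 < g') (cs : List Char) (h : cs ≠ []) :
    pvChunksL g' cs ≠ [] := by
  rw [pvChunksL_cons g' hg cs h]
  simp

-- B's streaming pass computes the separator-join of the chunk list
theorem pvRec_eq_join (sepl : List Char) (g' : ℕ) (hg : 0 < g') :
    ∀ (n : ℕ) (cs : List Char), cs.length ≤ n →
      pvRec sepl (g' : ℤ) cs 0 = PySem.Chars.join sepl (pvChunksL g' cs) := by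
  intro n
  induction n with
  | zero =>
    intro cs hlen
    have : cs = [] := List.eq_nil_of_length_eq_zero (by omega)
    subst this
    simp [pvRec, pvChunksL_nil g' hg, PySem.Chars.join_nil]
  | succ n ih =>
    intro cs hlen
    cases cs with
    | nil => simp [pvRec, pvChunksL_nil g' hg, PySem.Chars.join_nil]
    | cons c t =>
      have h0 : pvRec sepl (g' : ℤ) (c :: t) 0
          = (c :: t).take g'
            ++ (if (c :: t).drop g' = [] then []
                else pvRec sepl (g' : ℤ) ((c :: t).drop g') (g' : ℤ)) := by
        have := pvRec_run sepl g' hg (c :: t) 0 hg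
        simpa using this
      rw [h0, pvChunksL_cons g' hg (c :: t) (by simp)]
      by_cases hd : (c :: t).drop g' = []
      · rw [hd, pvChunksL_nil g' hg, if_pos rfl, PySem.Chars.join_singleton]
        simp
      · rw [if_neg hd]
        obtain ⟨d, ds, hds⟩ : ∃ d ds, (c :: t).drop g' = d :: ds := by
          cases hcs : (c :: t).drop g' with
          | nil => exact absurd hcs hd
          | cons d ds => exact ⟨d, ds, rfl⟩
        have hlen2 : ((c :: t).drop g').length ≤ n := by
          rw [List.length_drop]
          simp at hlen ⊢
          omega
        rw [hds, pvRec_top sepl g' hg d ds, ← hds, ih _ hlen2]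
        obtain ⟨p, ps, hps⟩ : ∃ p ps, pvChunksL g' ((c :: t).drop g') = p :: ps := by
          cases hcs : pvChunksL g' ((c :: t).drop g') with
          | nil => exact absurd hcs (pvChunksL_ne_nil g' hg _ hd)
          | cons p ps => exact ⟨p, ps, rfl⟩
        rw [hps, PySem.Chars.join_cons_cons]
        simp

-- the A-side chunk strings, viewed as character lists, are exactly pvChunksL
theorem pvChunksStr_toList (s : String) (g' : ℕ) (hg : 0 < g') :
    (pvChunksStr s (g' : ℤ)).map String.toList = pvChunksL g' s.toList := by
  unfold pvChunksStr pvChunksL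
  rw [PySem.Str.len_eq,
    PySem.List.pyRange_of_pos 0 _ (by exact_mod_cast hg : (0:ℤ) < (g':ℤ)),
    pvCount_eq s.toList.length g' hg, List.map_map, List.map_map]
  apply List.map_congr_left
  intro k _
  simp only [Function.comp]
  rw [PySem.Str.toList_slice, PySem.Chars.slice_eq_listSlice]
  have ha : (0:ℤ) ≤ 0 + (g':ℤ) * (k:ℤ) := by positivity
  have hb : (0:ℤ) ≤ 0 + (g':ℤ) * (k:ℤ) + (g':ℤ) := by positivity
  rw [PySem.List.slice_toNat _ ha hb]
  have hat : ((0:ℤ) + (g':ℤ) * (k:ℤ)).toNat = g' * k := by omega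
  have hbt : ((0:ℤ) + (g':ℤ) * (k:ℤ) + (g':ℤ)).toNat = g' * k + g' := by omega
  rw [hat, hbt]
  congr 1
  omega

theorem x_format_hash__mutmut_2_main (hash_value : String) (group_size : Int) (groups : Int) (separator : String) :
    x_format_hash__mutmut_2 hash_value group_size groups separator
      = x_format_hash__mutmut_2_alt hash_value group_size groups separator := by
  rw [pvA_eq_joinChunks]
  unfold pvJoinChunks x_format_hash__mutmut_2_alt
  by_cases hgs : group_size ≤ 0
  · simp [hgs]
  · rw [if_neg hgs, if_neg hgs]
    obtain ⟨g', hg'⟩ : ∃ g' : ℕ, group_size = (g' : ℤ) :=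
      ⟨group_size.toNat, (Int.toNat_of_nonneg (by omega)).symm⟩
    subst hg'
    have hg'pos : 0 < g' := by omega
    apply pvStr_ext
    rw [PySem.Str.toList_join, pvChunksStr_toList _ g' hg'pos]
    rw [← pvRec_eq_join separator.toList g' hg'pos _ _ (le_refl _)]
    rw [String.toList_ofList]
    rw [pvFold_eq_rec separator.toList (g' : ℤ)]
    simp

-- ===== VERDICT (by name: the statement is the Claim_ definition above) =====
theorem x_format_hash__mutmut_2_spec : Claim_equal_x_format_hash__mutmut_2 := by
  intro hash_value group_size groups separator _
  unfold Spec_x_format_hash__mutmut_2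
  exact x_format_hash__mutmut_2_main hash_value group_size groups separator
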